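-- pv_equiv track=rewrite | github.com/haolunc/ARC-RL | reference_solutions/solutions/3aa6fb7a.py | transform
-- ===== SOURCE A (Python) =====
-- def transform(grid):
--
--     out = [row[:] for row in grid]
--     h = len(grid)
--     w = len(grid[0]) if h else 0
--
--     for r in range(h - 1):
--         for c in range(w - 1):
--
--             cells = [(r, c), (r, c + 1), (r + 1, c), (r + 1, c + 1)]
--
--             eight_cnt = sum(1 for (i, j) in cells if grid[i][j] == 8)
--
--             if eight_cnt == 3:
--
--                 for (i, j) in cells:
--                     if grid[i][j] != 8:
--
--                         out[i][j] = 1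
--                         break
--     return out
-- ===== SOURCE B (Python) =====
-- def transform(grid):
--     h = len(grid)
--     w = len(grid[0]) if h else 0
--
--     def marked(i, j):
--         # does some 2x2 block containing (i, j) have its other three cells all 8?
--         for r in (i - 1, i):
--             for c in (j - 1, j):
--                 if (0 <= r < h - 1 and 0 <= c < w - 1
--                         and grid[i][j] != 8
--                         and all(grid[p][q] == 8
--                                 for p in (r, r + 1) for q in (c, c + 1)
--                                 if (p, q) != (i, j))):
--                     return True
--         return False
--
--     return [[1 if j < w and marked(i, j) else v
--              for j, v in enumerate(row)]
--             for i, row in enumerate(grid)]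
-- ===== Notes on version B (the rewrite author's own statement) =====
-- stated objective: alternative
-- what changed: A iterates over 2x2 windows, counts 8s per window and mutates the copied output at the window's first non-8 cell; B instead builds the output functionally per cell, marking a cell 1 exactly when some 2x2 block containing it has its other three cells equal to 8.
import Mathlib
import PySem

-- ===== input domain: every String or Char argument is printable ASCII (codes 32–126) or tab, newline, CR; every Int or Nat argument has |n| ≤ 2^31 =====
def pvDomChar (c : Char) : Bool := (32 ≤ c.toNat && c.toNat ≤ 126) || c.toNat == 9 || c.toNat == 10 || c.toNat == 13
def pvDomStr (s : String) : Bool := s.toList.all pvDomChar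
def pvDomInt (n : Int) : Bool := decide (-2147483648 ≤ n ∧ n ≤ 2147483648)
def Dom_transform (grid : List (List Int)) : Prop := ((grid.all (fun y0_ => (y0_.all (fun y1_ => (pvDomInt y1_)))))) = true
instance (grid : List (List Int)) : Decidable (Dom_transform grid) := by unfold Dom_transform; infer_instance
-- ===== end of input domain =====

-- B builds the output per cell (mark a cell 1 iff some 2x2 block containing it has its other
-- three cells equal to 8) instead of A's per-window mutation of a copied grid; same cost.
-- A mutates only its local copy `out`, never the argument grid.

-- ===== PORT A =====
-- grid[i][j] on nonnegative indices (every access A performs is in range on Pre_)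
def pvGet (g : List (List Int)) (i j : Nat) : Int := (g.getD i []).getD j 0
-- out[i][j] = v (in-place update of the copied grid)
def pvSet (g : List (List Int)) (i j : Nat) (v : Int) : List (List Int) :=
  g.set i ((g.getD i []).set j v)
-- cells = [(r, c), (r, c+1), (r+1, c), (r+1, c+1)]
def cellsOf (r c : Nat) : List (Nat × Nat) := [(r, c), (r, c + 1), (r + 1, c), (r + 1, c + 1)]
-- eight_cnt = sum(1 for (i,j) in cells if grid[i][j] == 8)
def eightCnt (g : List (List Int)) (r c : Nat) : Nat :=
  (cellsOf r c).countP (fun p => pvGet g p.1 p.2 == 8)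
-- the inner for-loop with break: set the first non-8 cell of the window to 1
def markFirst (g out : List (List Int)) : List (Nat × Nat) → List (List Int)
  | [] => out
  | p :: rest =>
      if pvGet g p.1 p.2 ≠ 8 then pvSet out p.1 p.2 1 else markFirst g out rest
def transform (grid : List (List Int)) : List (List Int) :=
  let h := grid.length
  let w := if h ≠ 0 then (grid.getD 0 []).length else 0
  (List.range (h - 1)).foldl
    (fun out r =>
      (List.range (w - 1)).foldl
        (fun out c =>
          if eightCnt grid r c = 3 then markFirst grid out (cellsOf r c) else out)
        out)
    grid

-- ===== PORT B =====
-- marked(i, j): some 2x2 block anchored at (r, c) ∈ {i-1,i}×{j-1,j}, in bounds, has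
-- grid[i][j] != 8 and all of its other three cells equal to 8
def markedB (g : List (List Int)) (h w i j : Nat) : Bool :=
  [(i : Int) - 1, (i : Int)].any fun r =>
    [(j : Int) - 1, (j : Int)].any fun c =>
      decide (0 ≤ r ∧ r < (h : Int) - 1 ∧ 0 ≤ c ∧ c < (w : Int) - 1) &&
      (pvGet g i j != 8) &&
      (([(r.toNat, c.toNat), (r.toNat, c.toNat + 1),
         (r.toNat + 1, c.toNat), (r.toNat + 1, c.toNat + 1)].filter
            (fun p => p ≠ (i, j))).all fun p => pvGet g p.1 p.2 == 8)
def transform_alt (grid : List (List Int)) : List (List Int) :=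
  let h := grid.length
  let w := if h ≠ 0 then (grid.getD 0 []).length else 0
  grid.mapIdx fun i row => row.mapIdx fun j v =>
    if j < w ∧ markedB grid h w i j then 1 else v

-- ===== PRECONDITION & SPEC =====
-- Pre_ excludes exactly the inputs where A raises IndexError: grids with at least 2 rows and
-- first-row width w ≥ 2 in which some row is shorter than w.
def Pre_transform (grid : List (List Int)) : Prop :=
  grid.length ≤ 1 ∨ (grid.headD []).length ≤ 1 ∨
    ∀ row ∈ grid, (grid.headD []).length ≤ row.length
instance (grid : List (List Int)) : Decidable (Pre_transform grid) := by
  unfold Pre_transform; infer_instance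
def pvWitness_transform : List (List Int) := [[8, 8], [8, 0]]
def Spec_transform (grid : List (List Int)) (out : List (List Int)) : Prop :=
  out = transform_alt grid
instance (grid : List (List Int)) (out : List (List Int)) : Decidable (Spec_transform grid out) := by
  unfold Spec_transform; infer_instance

-- ===== CLAIM (what is proved, stated in full; the proofs are below) =====
def Claim_equal_transform : Prop :=
  ∀ (grid : List (List Int)), Dom_transform grid → Pre_transform grid →
    Spec_transform grid (transform grid)

-- ===== LEMMAS AND PROOFS =====

-- the Python predicate "grid[i][j] != 8" of the break loop
def pred8 (g : List (List Int)) (p : Nat × Nat) : Bool := decide (pvGet g p.1 p.2 ≠ 8)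

-- one window step of A's loop
def stepA (g o : List (List Int)) (p : Nat × Nat) : List (List Int) :=
  if eightCnt g p.1 p.2 = 3 then markFirst g o (cellsOf p.1 p.2) else o

-- the list of windows A visits, in order
def windowsA (g : List (List Int)) : List (Nat × Nat) :=
  (List.range (g.length - 1)).flatMap fun r =>
    (List.range ((g.headD []).length - 1)).map fun c => (r, c)

-- does some window mark cell (i, j)?
def hitAny (g : List (List Int)) (i j : Nat) : Bool :=
  (windowsA g).any fun p =>
    (eightCnt g p.1 p.2 == 3) && ((cellsOf p.1 p.2).find? (pred8 g) == some (i, j))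

theorem w_eq (g : List (List Int)) :
    (if g.length ≠ 0 then (g.getD 0 []).length else 0) = (g.headD []).length := by
  cases g <;> simp

theorem markFirst_eq_find (g out : List (List Int)) (cells : List (Nat × Nat)) :
    markFirst g out cells =
      match cells.find? (pred8 g) with
      | some p => pvSet out p.1 p.2 1
      | none => out := by
  induction cells with
  | nil => simp [markFirst, List.find?]
  | cons p rest ih =>
      by_cases hp : pvGet g p.1 p.2 ≠ 8
      · rw [List.find?_cons_of_pos (by simpa [pred8] using hp)]
        simp [markFirst, hp]
      · rw [List.find?_cons_of_neg (by simpa [pred8] using hp)]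
        simp [markFirst, hp, ih]

theorem shape_pvSet (g : List (List Int)) (i j : Nat) (v : Int) :
    (pvSet g i j v).map List.length = g.map List.length := by
  unfold pvSet
  by_cases h : i < g.length
  · have hg : g.getD i [] = g[i] := by
      rw [List.getD_eq_getElem?_getD, List.getElem?_eq_getElem h]; rfl
    rw [List.map_set, hg, List.length_set]
    have h' : i < (g.map List.length).length := by simpa using h
    have : g[i].length = (g.map List.length)[i] := by simp
    rw [this, List.set_getElem_self]
  · rw [List.set_eq_of_length_le (le_of_not_gt h)]

theorem shape_markFirst (g out : List (List Int)) (cells : List (Nat × Nat)) :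
    (markFirst g out cells).map List.length = out.map List.length := by
  rw [markFirst_eq_find]
  cases h : cells.find? (pred8 g) <;> simp [shape_pvSet]

theorem shape_stepA (g o : List (List Int)) (p : Nat × Nat) :
    (stepA g o p).map List.length = o.map List.length := by
  unfold stepA; split <;> simp [shape_markFirst]

theorem shape_foldl (g : List (List Int)) (ws : List (Nat × Nat)) :
    ∀ out : List (List Int), (ws.foldl (stepA g) out).map List.length = out.map List.length := by
  induction ws with
  | nil => intro out; rfl
  | cons p rest ih => intro out; rw [List.foldl_cons, ih, shape_stepA]

theorem getD_set_row (g : List (List Int)) (x : List Int) (a i : Nat) (ha : a < g.length) :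
    (g.set a x).getD i [] = if a = i then x else g.getD i [] := by
  by_cases h : a = i
  · subst h; simp [List.getD_eq_getElem?_getD, ha]
  · simp [List.getD_eq_getElem?_getD, h]

theorem getD_set_int (row : List Int) (b j : Nat) (v : Int) :
    (row.set b v).getD j 0 = if b = j ∧ b < row.length then v else row.getD j 0 := by
  by_cases h : b = j
  · subst h
    by_cases hb : b < row.length
    · simp [List.getD_eq_getElem?_getD, hb]
    · simp [List.getD_eq_getElem?_getD, hb]
  · simp [List.getD_eq_getElem?_getD, h]

theorem pvGet_pvSet (g : List (List Int)) (a b i j : Nat) (v : Int) (ha : a < g.length) :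
    pvGet (pvSet g a b v) i j =
      if a = i ∧ b = j ∧ b < (g.getD a []).length then v else pvGet g i j := by
  unfold pvGet pvSet
  rw [getD_set_row g _ a i ha]
  by_cases hai : a = i
  · subst hai
    rw [if_pos rfl, getD_set_int]
    by_cases hbj : b = j ∧ b < (g.getD a []).length
    · simp [hbj]
    · rw [if_neg hbj, if_neg (by tauto)]
  · rw [if_neg hai, if_neg (by tauto)]

theorem row_len_of_shape (g out : List (List Int)) (hsh : out.map List.length = g.map List.length)
    (a : Nat) : (out.getD a []).length = (g.getD a []).length := by
  have hlen : out.length = g.length := by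
    have := congrArg List.length hsh; simpa using this
  by_cases h : a < g.length
  · have h' : a < out.length := by omega
    have := congrArg (fun l => l[a]?) hsh
    simp only [List.getElem?_map, List.getElem?_eq_getElem h, List.getElem?_eq_getElem h'] at this
    have : out[a].length = g[a].length := by simpa using this
    rw [List.getD_eq_getElem?_getD, List.getD_eq_getElem?_getD,
        List.getElem?_eq_getElem h, List.getElem?_eq_getElem h']
    simpa using this
  · have h' : ¬ a < out.length := by omega
    rw [List.getD_eq_getElem?_getD, List.getD_eq_getElem?_getD,
        List.getElem?_eq_none (le_of_not_gt h), List.getElem?_eq_none (le_of_not_gt h')]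

theorem foldl_cell (g : List (List Int))
    (hrect : ∀ row ∈ g, (g.headD []).length ≤ row.length)
    (i j : Nat) :
    ∀ (ws : List (Nat × Nat)),
    (∀ p ∈ ws, p.1 + 1 < g.length ∧ p.2 + 1 < (g.headD []).length) →
    ∀ out : List (List Int), out.map List.length = g.map List.length →
    pvGet (ws.foldl (stepA g) out) i j =
      if ws.any (fun p => (eightCnt g p.1 p.2 == 3) &&
          ((cellsOf p.1 p.2).find? (pred8 g) == some (i, j))) = true
      then 1 else pvGet out i j := by
  intro ws
  induction ws with
  | nil => intro _ out _; simp
  | cons p rest ih =>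
      intro hws out hsh
      have hp := hws p (List.mem_cons_self ..)
      rw [List.foldl_cons,
          ih (fun q hq => hws q (List.mem_cons_of_mem _ hq)) (stepA g out p)
            (by rw [shape_stepA]; exact hsh)]
      cases hrest : rest.any (fun p => (eightCnt g p.1 p.2 == 3) &&
          ((cellsOf p.1 p.2).find? (pred8 g) == some (i, j))) with
      | true => simp [List.any_cons, hrest]
      | false =>
          simp only [List.any_cons, hrest, Bool.or_false, Bool.false_eq_true, if_false]
          unfold stepA
          by_cases hcnt : eightCnt g p.1 p.2 = 3
          · rw [if_pos hcnt, markFirst_eq_find]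
            cases hf : (cellsOf p.1 p.2).find? (pred8 g) with
            | none => simp [hcnt]
            | some q =>
                have hqmem := List.mem_of_find?_eq_some hf
                have hqb : q.1 ≤ p.1 + 1 ∧ q.2 ≤ p.2 + 1 := by
                  simp only [cellsOf, List.mem_cons, List.not_mem_nil, or_false] at hqmem
                  rcases hqmem with h | h | h | h <;> (rw [h]; simp)
                have hq1 : q.1 < out.length := by
                  have : out.length = g.length := by
                    have := congrArg List.length hsh; simpa using this
                  omega
                have hq1g : q.1 < g.length := by omega
                have hq2 : q.2 < (out.getD q.1 []).length := by
                  rw [row_len_of_shape g out hsh]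
                  have hmem : g.getD q.1 [] ∈ g := by
                    rw [List.getD_eq_getElem?_getD, List.getElem?_eq_getElem hq1g]
                    exact List.getElem_mem _
                  have := hrect _ hmem
                  omega
                rw [pvGet_pvSet out q.1 q.2 i j 1 hq1]
                by_cases hqij : q = (i, j)
                · have h1 : q.1 = i := by rw [hqij]
                  have h2 : q.2 = j := by rw [hqij]
                  rw [if_pos ⟨h1, h2, hq2⟩]
                  simp [hqij, hcnt]
                · rw [if_neg (fun hcon => hqij (Prod.ext hcon.1 hcon.2.1))]
                  simp [hqij, hcnt]
          · rw [if_neg hcnt]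
            simp [hcnt]

theorem double_foldl (g : List (List Int)) (l1 l2 : List Nat) :
    ∀ init : List (List Int),
      l1.foldl (fun out r => l2.foldl (fun out c => stepA g out (r, c)) out) init
        = (l1.flatMap fun r => l2.map fun c => (r, c)).foldl (stepA g) init := by
  induction l1 with
  | nil => intro init; rfl
  | cons r rest ih =>
      intro init
      rw [List.foldl_cons, List.flatMap_cons, List.foldl_append, List.foldl_map, ih]

theorem transform_eq_foldl (g : List (List Int)) :
    transform g = (windowsA g).foldl (stepA g) g := by
  show (List.range (g.length - 1)).foldl
      (fun out r => (List.range ((if g.length ≠ 0 then (g.getD 0 []).length else 0) - 1)).foldl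
        (fun out c => if eightCnt g r c = 3 then markFirst g out (cellsOf r c) else out) out) g
    = (windowsA g).foldl (stepA g) g
  rw [w_eq]
  unfold windowsA
  exact double_foldl g _ _ g

theorem transform_cell (g : List (List Int))
    (hrect : ∀ row ∈ g, (g.headD []).length ≤ row.length) (i j : Nat) :
    pvGet (transform g) i j = if hitAny g i j = true then 1 else pvGet g i j := by
  rw [transform_eq_foldl]
  rw [foldl_cell g hrect i j (windowsA g) ?bounds g rfl]
  · rfl
  case bounds =>
    intro p hp
    unfold windowsA at hp
    simp only [List.mem_flatMap, List.mem_map, List.mem_range] at hp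
    obtain ⟨r, hr, c, hc, rfl⟩ := hp
    exact ⟨by omega, by omega⟩

theorem win_iff (g : List (List Int)) (r c i j : Nat)
    (hne : pvGet g i j ≠ 8) (hmem : (i, j) ∈ cellsOf r c) :
    (eightCnt g r c = 3 ∧ (cellsOf r c).find? (pred8 g) = some (i, j)) ↔
      (((cellsOf r c).filter (fun p => p ≠ (i, j))).all
        (fun p => pvGet g p.1 p.2 == 8)) = true := by
  simp only [cellsOf, List.mem_cons, List.not_mem_nil, or_false, Prod.mk.injEq] at hmem
  by_cases h1 : pvGet g r c = 8 <;>
    by_cases h2 : pvGet g r (c + 1) = 8 <;>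
    by_cases h3 : pvGet g (r + 1) c = 8 <;>
    by_cases h4 : pvGet g (r + 1) (c + 1) = 8 <;>
    rcases hmem with ⟨rfl, rfl⟩ | ⟨rfl, rfl⟩ | ⟨rfl, rfl⟩ | ⟨rfl, rfl⟩ <;>
    simp_all [eightCnt, cellsOf, List.countP_nil, pred8,
      List.find?, List.filter, List.all_cons, Prod.mk.injEq]

theorem crux (g : List (List Int)) (i j : Nat) :
    hitAny g i j = true ↔
      (j < (g.headD []).length ∧
        markedB g g.length (g.headD []).length i j = true) := by
  constructor
  · intro hh
    unfold hitAny windowsA at hh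
    simp only [List.any_eq_true, List.mem_flatMap, List.mem_map, List.mem_range,
      Bool.and_eq_true, beq_iff_eq] at hh
    obtain ⟨p, ⟨r, hr, c, hc, rfl⟩, hcnt, hfind⟩ := hh
    have hne : pvGet g i j ≠ 8 := by
      have := List.find?_some hfind; simpa [pred8] using this
    have hmem := List.mem_of_find?_eq_some hfind
    have hall := (win_iff g r c i j hne hmem).mp ⟨hcnt, hfind⟩
    have hmem' : (i = r ∨ i = r + 1) ∧ (j = c ∨ j = c + 1) := by
      simp only [cellsOf, List.mem_cons, List.not_mem_nil, or_false, Prod.mk.injEq] at hmem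
      tauto
    refine ⟨by omega, ?_⟩
    unfold markedB
    simp only [List.any_eq_true, List.mem_cons, List.not_mem_nil, or_false,
      Bool.and_eq_true, decide_eq_true_eq, bne_iff_ne, ne_eq]
    refine ⟨(r : Int), ?_, (c : Int), ?_, ⟨⟨by omega, by omega, by omega, by omega⟩, hne⟩, ?_⟩
    · rcases hmem'.1 with h | h
      · right; omega
      · left; omega
    · rcases hmem'.2 with h | h
      · right; omega
      · left; omega
    · simpa [cellsOf, Int.toNat_natCast] using hall
  · rintro ⟨hjw, hm⟩
    unfold markedB at hm
    simp only [List.any_eq_true, List.mem_cons, List.not_mem_nil, or_false,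
      Bool.and_eq_true, decide_eq_true_eq, bne_iff_ne, ne_eq] at hm
    obtain ⟨r', hr', c', hc', ⟨⟨hb1, hb2, hb3, hb4⟩, hne⟩, hall⟩ := hm
    have hmem : (i, j) ∈ cellsOf r'.toNat c'.toNat := by
      rcases hr' with rfl | rfl <;> rcases hc' with rfl | rfl <;>
        (simp only [cellsOf, List.mem_cons, List.not_mem_nil, or_false, Prod.mk.injEq]; omega)
    have hall' : ((cellsOf r'.toNat c'.toNat).filter (fun p => p ≠ (i, j))).all
        (fun p => pvGet g p.1 p.2 == 8) = true := by
      simpa [cellsOf] using hall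
    have hwin := (win_iff g r'.toNat c'.toNat i j hne hmem).mpr hall'
    unfold hitAny windowsA
    simp only [List.any_eq_true, List.mem_flatMap, List.mem_map, List.mem_range,
      Bool.and_eq_true, beq_iff_eq]
    exact ⟨(r'.toNat, c'.toNat), ⟨r'.toNat, by omega, c'.toNat, by omega, rfl⟩,
      hwin.1, hwin.2⟩

theorem foldl_id {α β : Type} (l : List β) (init : α) :
    l.foldl (fun o _ => o) init = init := by
  induction l generalizing init with
  | nil => rfl
  | cons _ rest ih => exact ih init

theorem mapIdx_id_of {α : Type} (l : List α) (f : Nat → α → α) (hf : ∀ i a, f i a = a) :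
    l.mapIdx f = l := by
  induction l generalizing f with
  | nil => rfl
  | cons a rest ih => rw [List.mapIdx_cons, hf, ih _ (fun i a => hf (i + 1) a)]

theorem transform_deg (g : List (List Int))
    (hdeg : g.length ≤ 1 ∨ (g.headD []).length ≤ 1) : transform g = g := by
  show (List.range (g.length - 1)).foldl
      (fun out r => (List.range ((if g.length ≠ 0 then (g.getD 0 []).length else 0) - 1)).foldl
        (fun out c => if eightCnt g r c = 3 then markFirst g out (cellsOf r c) else out) out) g
    = g
  rw [w_eq]
  rcases hdeg with h | h
  · have h0 : g.length - 1 = 0 := by omega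
    rw [h0]; rfl
  · have h0 : (g.headD []).length - 1 = 0 := by omega
    rw [h0]
    exact foldl_id _ g

theorem markedB_deg (g : List (List Int)) (i j : Nat)
    (hdeg : g.length ≤ 1 ∨ (g.headD []).length ≤ 1) :
    markedB g g.length (g.headD []).length i j = false := by
  refine Bool.eq_false_iff.mpr fun hm => ?_
  unfold markedB at hm
  simp only [List.any_eq_true, List.mem_cons, List.not_mem_nil, or_false,
    Bool.and_eq_true, decide_eq_true_eq] at hm
  obtain ⟨r', _, c', _, ⟨⟨hb1, hb2, hb3, hb4⟩, -⟩, -⟩ := hm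
  rcases hdeg with h | h <;> omega

theorem alt_deg (g : List (List Int))
    (hdeg : g.length ≤ 1 ∨ (g.headD []).length ≤ 1) : transform_alt g = g := by
  show (g.mapIdx fun i row => row.mapIdx fun j v =>
      if j < (if g.length ≠ 0 then (g.getD 0 []).length else 0) ∧
          markedB g g.length (if g.length ≠ 0 then (g.getD 0 []).length else 0) i j
      then 1 else v) = g
  rw [w_eq]
  apply mapIdx_id_of
  intro i row
  apply mapIdx_id_of
  intro j v
  rw [markedB_deg g i j hdeg]
  simp

theorem getElem_pvGet (l : List (List Int)) (i j : Nat) (hi : i < l.length)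
    (hj : j < l[i].length) : l[i][j] = pvGet l i j := by
  have h1 : l.getD i [] = l[i] := by
    rw [List.getD_eq_getElem?_getD, List.getElem?_eq_getElem hi, Option.getD_some]
  unfold pvGet
  rw [h1, List.getD_eq_getElem?_getD, List.getElem?_eq_getElem hj, Option.getD_some]

theorem main_rect (g : List (List Int))
    (hrect : ∀ row ∈ g, (g.headD []).length ≤ row.length) :
    transform g = transform_alt g := by
  have hsh : (transform g).map List.length = g.map List.length := by
    rw [transform_eq_foldl]; exact shape_foldl g (windowsA g) g
  have hlen : (transform g).length = g.length := by
    have := congrArg List.length hsh; simpa using this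
  have haltlen : (transform_alt g).length = g.length := by
    simp [transform_alt]
  refine List.ext_getElem (by omega) ?_
  intro i h1 h2
  have hi : i < g.length := by omega
  have hrowlen : (transform g)[i].length = g[i].length := by
    have := row_len_of_shape g (transform g) hsh i
    rwa [List.getD_eq_getElem?_getD, List.getD_eq_getElem?_getD,
        List.getElem?_eq_getElem hi, List.getElem?_eq_getElem h1,
        Option.getD_some, Option.getD_some] at this
  refine List.ext_getElem ?_ ?_
  · simp only [transform_alt, List.getElem_mapIdx, List.length_mapIdx]
    exact hrowlen
  · intro j hj1 hj2
    have hjg : j < g[i].length := by omega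
    rw [getElem_pvGet (transform g) i j h1 hj1, transform_cell g hrect i j]
    simp only [transform_alt, List.getElem_mapIdx, w_eq]
    by_cases hhit : hitAny g i j = true
    · rw [if_pos hhit, if_pos ((crux g i j).mp hhit)]
    · rw [if_neg hhit, if_neg (fun hcon => hhit ((crux g i j).mpr hcon))]
      exact (getElem_pvGet g i j hi hjg).symm

-- ===== VERDICT (by name: the statement is the Claim_ definition above) =====
theorem transform_spec : Claim_equal_transform := by
  intro grid _ hpre
  unfold Spec_transform
  by_cases hrect : ∀ row ∈ grid, (grid.headD []).length ≤ row.length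
  · exact main_rect grid hrect
  · have hdeg : grid.length ≤ 1 ∨ (grid.headD []).length ≤ 1 := by
      rcases hpre with h | h | h
      · exact Or.inl h
      · exact Or.inr h
      · exact absurd h hrect
    rw [transform_deg grid hdeg, alt_deg grid hdeg]
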